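-- pv_equiv track=rewrite | github.com/Dalmanski/PiPaste-4000 | PiPaste 4000.py | split_into_cards
-- ===== SOURCE A (Python) =====
-- LIMIT = 4000
--
-- def split_into_cards(text, limit=LIMIT):
--     lines = text.splitlines(keepends=True)
--     cards = []
--     current = ""
--     for line in lines:
--         if len(current) + len(line) <= limit:
--             current += line
--         else:
--             if current:
--                 cards.append(current)
--                 current = ""
--             if len(line) <= limit:
--                 current += line
--             else:
--                 i = 0
--                 while i < len(line):
--                     remaining = limit - len(current)
--                     if remaining == 0:
--                         cards.append(current)
--                         current = ""
--                         remaining = limit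
--                     take = min(remaining, len(line) - i)
--                     current += line[i:i+take]
--                     i += take
--                     if len(current) == limit:
--                         cards.append(current)
--                         current = ""
--     if current:
--         cards.append(current)
--     return cards
-- ===== SOURCE B (Python) =====
-- LIMIT = 4000
--
-- def split_into_cards(text, limit=LIMIT):
--     # Phase 1: turn the text into units no longer than limit.
--     units = []
--     for line in text.splitlines(keepends=True):
--         if len(line) <= limit:
--             units.append(line)
--         else:
--             rest = line
--             while len(rest) > limit:
--                 units.append(rest[:limit])
--                 rest = rest[limit:]
--             units.append(rest)
--     # Phase 2: greedy pack of the units.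
--     cards = []
--     current = ""
--     for u in units:
--         if len(current) + len(u) <= limit:
--             current += u
--         else:
--             if current:
--                 cards.append(current)
--             current = u
--     if current:
--         cards.append(current)
--     return cards
-- ===== Notes on version B (the rewrite author's own statement) =====
-- stated objective: simpler
-- what changed: A's single stateful line loop with a nested index-advancing while (tracking cards/current/i/remaining/take) is replaced by two plain phases: first unitize every line into pieces of length <= limit, then one uniform greedy pack over the flat unit list.
import Mathlib
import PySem

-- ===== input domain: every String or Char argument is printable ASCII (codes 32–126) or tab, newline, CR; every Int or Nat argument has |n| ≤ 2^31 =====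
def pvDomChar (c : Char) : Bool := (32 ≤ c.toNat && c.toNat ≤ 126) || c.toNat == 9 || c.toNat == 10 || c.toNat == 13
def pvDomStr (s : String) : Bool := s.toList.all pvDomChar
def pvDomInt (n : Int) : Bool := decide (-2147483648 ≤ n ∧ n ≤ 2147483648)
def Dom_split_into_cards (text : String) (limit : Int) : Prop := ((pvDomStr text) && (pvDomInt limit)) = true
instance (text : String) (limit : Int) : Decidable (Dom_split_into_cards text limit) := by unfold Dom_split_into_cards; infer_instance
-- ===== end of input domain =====

-- B rebuilds A's single stateful line loop as two plain phases — unitize every line to pieces of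
-- length ≤ limit, then one greedy pack over the units (objective: simpler decomposition, no speed claim).

-- ===== PORT A =====
-- shared helper of both ports: text.splitlines(keepends=True), ported by hand; exact on the Dom
-- character set (32–126, tab, '\n', '\r'), whose only line boundaries are '\n', '\r' and '\r\n'.
def pvSplitlinesKeep : List Char → List Char → List (List Char)
  | acc, [] => if acc = [] then [] else [acc]
  | acc, '\r' :: '\n' :: rest => (acc ++ ['\r', '\n']) :: pvSplitlinesKeep [] rest
  | acc, '\r' :: rest => (acc ++ ['\r']) :: pvSplitlinesKeep [] rest
  | acc, '\n' :: rest => (acc ++ ['\n']) :: pvSplitlinesKeep [] rest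
  | acc, c :: rest => pvSplitlinesKeep (acc ++ [c]) rest
termination_by _ s => s.length

-- A's inner 'while i < len(line)' loop; fuel-based (A's Python diverges here when limit ≤ 0,
-- which Pre_ excludes; inside Pre_ the fuel line.length + 1 is never exhausted).
def pvChunkA (limit : Int) (line : List Char) : Nat → Int → List (List Char) × List Char → List (List Char) × List Char
  | 0, _, st => st
  | fuel+1, i, st =>
    if i < (line.length : Int) then
      let rem0 := limit - (st.2.length : Int)
      let cards1 := if rem0 = 0 then st.1 ++ [st.2] else st.1
      let cur1 : List Char := if rem0 = 0 then [] else st.2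
      let remaining := if rem0 = 0 then limit else rem0
      let take := min remaining ((line.length : Int) - i)
      let cur2 := cur1 ++ PySem.List.slice line (some i) (some (i + take))
      if (cur2.length : Int) = limit then
        pvChunkA limit line fuel (i + take) (cards1 ++ [cur2], [])
      else
        pvChunkA limit line fuel (i + take) (cards1, cur2)
    else st

-- the body of A's 'for line in lines' loop
def pvStepA (limit : Int) (st : List (List Char) × List Char) (line : List Char) : List (List Char) × List Char :=
  if (st.2.length : Int) + (line.length : Int) ≤ limit then (st.1, st.2 ++ line)
  else
    let cards1 := if st.2 ≠ [] then st.1 ++ [st.2] else st.1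
    let cur1 : List Char := if st.2 ≠ [] then [] else st.2
    if (line.length : Int) ≤ limit then (cards1, cur1 ++ line)
    else pvChunkA limit line (line.length + 1) 0 (cards1, cur1)

def split_into_cards (text : String) (limit : Int) : List String :=
  let lines := pvSplitlinesKeep [] text.toList
  let st := lines.foldl (pvStepA limit) ([], [])
  (if st.2 ≠ [] then st.1 ++ [st.2] else st.1).map String.ofList

-- ===== PORT B =====
-- B's 'while len(rest) > limit' slicing loop; fuel-based for the same reason as pvChunkA.
def pvChunkB (limit : Int) : Nat → List Char → List (List Char)
  | 0, rest => [rest]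
  | fuel+1, rest =>
    if limit < (rest.length : Int) then
      PySem.List.slice rest none (some limit) :: pvChunkB limit fuel (PySem.List.slice rest (some limit) none)
    else [rest]

-- phase 1 per line: the units one line contributes
def pvUnits (limit : Int) (line : List Char) : List (List Char) :=
  if (line.length : Int) ≤ limit then [line]
  else pvChunkB limit (line.length + 1) line

-- phase 2: the body of B's greedy 'for u in units' loop
def pvPackStep (limit : Int) (st : List (List Char) × List Char) (u : List Char) : List (List Char) × List Char :=
  if (st.2.length : Int) + (u.length : Int) ≤ limit then (st.1, st.2 ++ u)
  else ((if st.2 ≠ [] then st.1 ++ [st.2] else st.1), u)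

def split_into_cards_alt (text : String) (limit : Int) : List String :=
  let lines := pvSplitlinesKeep [] text.toList
  let units := lines.foldl (fun us line => us ++ pvUnits limit line) []
  let st := units.foldl (pvPackStep limit) ([], [])
  (if st.2 ≠ [] then st.1 ++ [st.2] else st.1).map String.ofList

-- ===== PRECONDITION & SPEC =====
-- Pre_ excludes limit ≤ 0 with nonempty text: there A's inner while loop never makes progress and
-- the Python diverges (returns nothing), so nothing is claimed on those inputs.
def Pre_split_into_cards (text : String) (limit : Int) : Prop := 1 ≤ limit ∨ text = ""
instance (text : String) (limit : Int) : Decidable (Pre_split_into_cards text limit) := by unfold Pre_split_into_cards; infer_instance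
def pvWitness_split_into_cards : String × Int := ("ab\ncd\n", 3)

def Spec_split_into_cards (text : String) (limit : Int) (out : List String) : Prop := out = split_into_cards_alt text limit
instance (text : String) (limit : Int) (out : List String) : Decidable (Spec_split_into_cards text limit out) := by unfold Spec_split_into_cards; infer_instance

-- ===== CLAIM (what is proved, stated in full; the proofs are below) =====
def Claim_equal_split_into_cards : Prop := ∀ (text : String) (limit : Int), Dom_split_into_cards text limit → Pre_split_into_cards text limit → Spec_split_into_cards text limit (split_into_cards text limit)

-- ===== LEMMAS AND PROOFS =====

-- mathematical shape of both chunking loops: maximal full blocks plus a (nonempty) tail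
def chunksSpec (l : Nat) (rest : List Char) : List (List Char) :=
  if _h : rest.length ≤ l ∨ l = 0 then [rest]
  else rest.take l :: chunksSpec l (rest.drop l)
termination_by rest.length
decreasing_by simp; omega

-- the cards list a final state flushes to
def pvFlush (st : List (List Char) × List Char) : List (List Char) :=
  if st.2 ≠ [] then st.1 ++ [st.2] else st.1

-- A's state vs B's state: equal, or A has already flushed a full-length current that B still holds
def pvRel (limit : Int) (a b : List (List Char) × List Char) : Prop :=
  a = b ∨ (a.2 = [] ∧ (b.2.length : Int) = limit ∧ a.1 = b.1 ++ [b.2])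

theorem pvSplitlinesKeep_ne_nil (acc s : List Char) :
    ∀ l ∈ pvSplitlinesKeep acc s, l ≠ [] := by
  induction acc, s using pvSplitlinesKeep.induct with
  | case1 => simp [pvSplitlinesKeep]
  | case2 acc h => rw [pvSplitlinesKeep]; simp [h]
  | case3 acc rest ih =>
      rw [pvSplitlinesKeep]
      intro l hl
      rcases List.mem_cons.1 hl with h | h
      · simp [h]
      · exact ih l h
  | case4 acc rest hne ih =>
      rw [pvSplitlinesKeep]
      · intro l hl
        rcases List.mem_cons.1 hl with h | h
        · simp [h]
        · exact ih l h
      · exact hne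
  | case5 acc rest ih =>
      rw [pvSplitlinesKeep]
      · intro l hl
        rcases List.mem_cons.1 hl with h | h
        · simp [h]
        · exact ih l h
  | case6 acc c rest h1 h2 h3 ih =>
      rw [pvSplitlinesKeep]
      · exact ih
      · exact h1
      · exact h2
      · exact h3

theorem chunksSpec_le {l : Nat} {rest : List Char} (h : rest.length ≤ l) :
    chunksSpec l rest = [rest] := by
  rw [chunksSpec]; simp [h]

theorem chunksSpec_gt {l : Nat} {rest : List Char} (h : l < rest.length) (hl : 0 < l) :
    chunksSpec l rest = rest.take l :: chunksSpec l (rest.drop l) := by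
  rw [chunksSpec]; rw [dif_neg (by omega)]

theorem chunksSpec_len {l : Nat} (hl : 0 < l) (rest : List Char) :
    ∀ u ∈ chunksSpec l rest, u.length ≤ l := by
  induction rest using chunksSpec.induct l with
  | case1 rest h =>
      rcases h with h | h
      · rw [chunksSpec_le h]; simp; omega
      · omega
  | case2 rest h ih =>
      push Not at h
      rw [chunksSpec_gt h.1 hl]
      intro u hu
      rcases List.mem_cons.1 hu with h2 | h2
      · subst h2; simp
      · exact ih u h2

theorem chunksSpec_ne_nil {l : Nat} (hl : 0 < l) (rest : List Char) (h : rest ≠ []) :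
    ∀ u ∈ chunksSpec l rest, u ≠ [] := by
  induction rest using chunksSpec.induct l with
  | case1 rest hc =>
      rcases hc with hc | hc
      · rw [chunksSpec_le hc]; simpa using h
      · omega
  | case2 rest hc ih =>
      push Not at hc
      rw [chunksSpec_gt hc.1 hl]
      intro u hu
      rcases List.mem_cons.1 hu with h2 | h2
      · subst h2
        have : (rest.take l).length = l := by simp; omega
        intro hnil; rw [hnil] at this; simp at this; omega
      · exact ih (by intro hd; simp [List.drop_eq_nil_iff] at hd; omega) u h2

theorem chunkB_eq {limit : Int} (hL : 1 ≤ limit) (fuel : Nat) (rest : List Char)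
    (hf : rest.length ≤ fuel) : pvChunkB limit fuel rest = chunksSpec limit.toNat rest := by
  induction fuel generalizing rest with
  | zero =>
      have : rest.length = 0 := by omega
      rw [pvChunkB, chunksSpec_le (by omega)]
  | succ f ih =>
      rw [pvChunkB]
      by_cases h : limit < (rest.length : Int)
      · rw [if_pos h, PySem.List.slice_to rest (by omega), PySem.List.slice_from rest (by omega),
            chunksSpec_gt (by omega) (by omega), ih _ (by simp; omega)]
      · rw [if_neg h, chunksSpec_le (by omega)]

theorem chunkA_stop {limit : Int} {line : List Char} {fuel : Nat} {i : Int}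
    {st : List (List Char) × List Char} (h : ¬ i < (line.length : Int)) :
    pvChunkA limit line fuel i st = st := by
  cases fuel <;> simp [pvChunkA, h]

theorem pack_flush_chunk {limit : Int} (a : List (List Char) × List Char)
    {u : List Char} (hu : (u.length : Int) = limit) :
    pvPackStep limit a u = (pvFlush a, u) := by
  by_cases h : a.2 = []
  · rw [pvPackStep, if_pos (by rw [h]; simp; omega)]
    simp [pvFlush, h]
  · have hlen : 1 ≤ a.2.length := by
      cases hx : a.2 with
      | nil => exact absurd hx h
      | cons y ys => simp
    rw [pvPackStep, if_neg (by omega)]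
    simp [pvFlush, h]

theorem pack_shift {limit : Int} {b1 : List (List Char)} {b2 u : List Char}
    (hu : u ≠ []) (hul : (u.length : Int) ≤ limit) (hb : (b2.length : Int) = limit) :
    pvPackStep limit (b1, b2) u = pvPackStep limit (b1 ++ [b2], []) u := by
  have hune : 1 ≤ u.length := by
    cases hx : u with
    | nil => exact absurd hx hu
    | cons y ys => simp
  have hbne : b2 ≠ [] := by intro hx; rw [hx] at hb; simp at hb; omega
  rw [pvPackStep, if_neg (by push_cast; omega), if_pos hbne]
  rw [pvPackStep, if_pos (by simp; omega)]
  simp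

theorem chunksSpec_ne_nil' (l : Nat) (rest : List Char) : chunksSpec l rest ≠ [] := by
  rw [chunksSpec]; split <;> simp

theorem mainChunk {limit : Int} (hL : 1 ≤ limit) (line : List Char) :
    ∀ (fuel : Nat) (i : Nat) (c : List (List Char)), i < line.length → line.length - i ≤ fuel →
    pvRel limit (pvChunkA limit line fuel (i : Int) (c, []))
      ((chunksSpec limit.toNat (line.drop i)).foldl (pvPackStep limit) (c, [])) := by
  intro fuel
  induction fuel with
  | zero => intro i c h1 h2; omega
  | succ f ih =>
    intro i c h1 h2
    have hi : ((i : Int)) < (line.length : Int) := by exact_mod_cast h1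
    have hlen_drop : (line.drop i).length = line.length - i := by simp
    rw [pvChunkA, if_pos hi]
    have hrem : ¬ (limit - (((c, ([] : List Char)).2.length : Nat) : Int) = 0) := by simp; omega
    simp only [if_neg hrem]
    simp only [List.length_nil, Nat.cast_zero, sub_zero]
    have htake1 : (1 : Int) ≤ min limit ((line.length : Int) - i) := by
      refine le_min hL ?_; omega
    rw [PySem.List.slice_toNat line (by positivity) (by omega)]
    simp only [Int.toNat_natCast, List.nil_append]
    by_cases hA : (line.length : Int) - i ≤ limit
    · -- the whole remainder fits in one chunk
      have hmin : min limit ((line.length : Int) - i) = (line.length : Int) - i := min_eq_right hA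
      rw [hmin]
      have htn : (((i : Int) + ((line.length : Int) - i)).toNat - i) = line.length - i := by omega
      rw [htn]
      have htake_all : (line.drop i).take (line.length - i) = line.drop i := by
        apply List.take_of_length_le; omega
      rw [htake_all]
      have hstop : ¬ ((i : Int) + ((line.length : Int) - i) < (line.length : Int)) := by omega
      rw [chunksSpec_le (by omega)]
      by_cases hEq : ((line.drop i).length : Int) = limit
      · rw [if_pos hEq, chunkA_stop hstop, List.foldl_cons, List.foldl_nil,
            pvPackStep, if_pos (by simp; omega)]
        right
        exact ⟨rfl, hEq, by simp⟩
      · rw [if_neg hEq, chunkA_stop hstop, List.foldl_cons, List.foldl_nil,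
            pvPackStep, if_pos (by simp; omega)]
        left
        simp
    · -- a full chunk is cut off and the loop continues
      have hmin : min limit ((line.length : Int) - i) = limit := min_eq_left (by omega)
      rw [hmin]
      have htn : (((i : Int) + limit).toNat - i) = limit.toNat := by omega
      rw [htn]
      set blk := (line.drop i).take limit.toNat with hblk
      have hblklen : blk.length = limit.toNat := by
        rw [hblk]; simp; omega
      have hblkInt : ((blk.length : Nat) : Int) = limit := by rw [hblklen]; omega
      rw [if_pos hblkInt]
      have hiL : (i : Int) + limit = ((i + limit.toNat : Nat) : Int) := by push_cast; omega
      rw [hiL]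
      have hrel := ih (i + limit.toNat) (c ++ [blk]) (by omega) (by omega)
      have hdd : (line.drop i).drop limit.toNat = line.drop (i + limit.toNat) := by
        rw [List.drop_drop]
      have hrhs : (chunksSpec limit.toNat (line.drop i)).foldl (pvPackStep limit) (c, []) =
          (chunksSpec limit.toNat (line.drop (i + limit.toNat))).foldl (pvPackStep limit)
            (c ++ [blk], []) := by
        rw [chunksSpec_gt (by omega) (by omega), ← hblk, hdd, List.foldl_cons,
            pack_flush_chunk _ hblkInt]
        have hfl : pvFlush (c, ([] : List Char)) = c := by rw [pvFlush]; simp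
        rw [hfl]
        have hne2 : line.drop (i + limit.toNat) ≠ [] := by
          intro hx
          have := congrArg List.length hx
          simp at this
          omega
        cases hus : chunksSpec limit.toNat (line.drop (i + limit.toNat)) with
        | nil => exact absurd hus (chunksSpec_ne_nil' _ _)
        | cons u0 tl =>
            rw [List.foldl_cons, List.foldl_cons,
                pack_shift (chunksSpec_ne_nil (by omega) _ hne2 u0 (hus ▸ List.mem_cons_self))
                  (by have := chunksSpec_len (show 0 < limit.toNat by omega) (line.drop (i + limit.toNat)) u0 (hus ▸ List.mem_cons_self); omega)
                  hblkInt]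
      rw [hrhs]
      exact hrel

theorem units_ne_nil {limit : Int} (hL : 1 ≤ limit) (line : List Char) :
    pvUnits limit line ≠ [] := by
  rw [pvUnits]
  split
  · simp
  · rw [chunkB_eq hL _ line (by omega)]
    exact chunksSpec_ne_nil' _ _

theorem units_mem {limit : Int} (hL : 1 ≤ limit) {line : List Char} (hline : line ≠ [])
    {u : List Char} (hu : u ∈ pvUnits limit line) : u ≠ [] ∧ (u.length : Int) ≤ limit := by
  rw [pvUnits] at hu
  by_cases h : (line.length : Int) ≤ limit
  · rw [if_pos h] at hu
    simp at hu
    subst hu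
    exact ⟨hline, h⟩
  · rw [if_neg h, chunkB_eq hL _ line (by omega)] at hu
    have hl : 0 < limit.toNat := by omega
    refine ⟨chunksSpec_ne_nil hl line hline u hu, ?_⟩
    have := chunksSpec_len hl line u hu
    omega

theorem stepCore {limit : Int} (hL : 1 ≤ limit) {line : List Char} (hline : line ≠ [])
    (a : List (List Char) × List Char) :
    pvRel limit (pvStepA limit a line) ((pvUnits limit line).foldl (pvPackStep limit) a) := by
  have hlpos : 0 < line.length := List.length_pos_iff.2 hline
  by_cases hc1 : (a.2.length : Int) + (line.length : Int) ≤ limit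
  · have hll : (line.length : Int) ≤ limit := by omega
    rw [pvStepA, if_pos hc1, pvUnits, if_pos hll, List.foldl_cons, List.foldl_nil,
        pvPackStep, if_pos hc1]
    exact Or.inl rfl
  · by_cases hc2 : (line.length : Int) ≤ limit
    · rw [pvStepA, if_neg hc1, pvUnits]
      simp only [if_pos hc2]
      rw [List.foldl_cons, List.foldl_nil, pvPackStep, if_neg hc1]
      left
      by_cases hz : a.2 = [] <;> simp [hz]
    · rw [pvStepA, if_neg hc1]
      simp only [if_neg hc2]
      have hcur : (if a.2 ≠ [] then ([] : List Char) else a.2) = [] := by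
        by_cases hz : a.2 = [] <;> simp [hz]
      have hcards : (if a.2 ≠ [] then a.1 ++ [a.2] else a.1) = pvFlush a := by rw [pvFlush]
      rw [hcur, hcards]
      have hrel := mainChunk hL line (line.length + 1) 0 (pvFlush a) hlpos (by omega)
      simp only [Nat.cast_zero, List.drop_zero] at hrel
      have hrhs : (pvUnits limit line).foldl (pvPackStep limit) a =
          (chunksSpec limit.toNat line).foldl (pvPackStep limit) (pvFlush a, []) := by
        rw [pvUnits, if_neg hc2, chunkB_eq hL _ line (by omega),
            chunksSpec_gt (by omega) (by omega), List.foldl_cons, List.foldl_cons]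
        have hblkInt : (((line.take limit.toNat).length : Nat) : Int) = limit := by
          simp; omega
        rw [pack_flush_chunk a hblkInt, pack_flush_chunk _ hblkInt]
        have : pvFlush (pvFlush a, ([] : List Char)) = pvFlush a := by
          rw [pvFlush]; simp
        rw [this]
      rw [hrhs]
      exact hrel

theorem stepRel {limit : Int} (hL : 1 ≤ limit) {line : List Char} (hline : line ≠ [])
    {a b : List (List Char) × List Char} (hrel : pvRel limit a b) :
    pvRel limit (pvStepA limit a line) ((pvUnits limit line).foldl (pvPackStep limit) b) := by
  rcases hrel with h | ⟨h1, h2, h3⟩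
  · subst h
    exact stepCore hL hline a
  · have hshift : (pvUnits limit line).foldl (pvPackStep limit) b =
        (pvUnits limit line).foldl (pvPackStep limit) a := by
      cases hus : pvUnits limit line with
      | nil => exact absurd hus (units_ne_nil hL line)
      | cons u0 tl =>
          rw [List.foldl_cons, List.foldl_cons]
          have hm := units_mem hL hline (u := u0) (by rw [hus]; exact List.mem_cons_self)
          have : pvPackStep limit (b.1, b.2) u0 = pvPackStep limit (b.1 ++ [b.2], []) u0 :=
            pack_shift hm.1 hm.2 h2
          have ha2 : a = (b.1 ++ [b.2], ([] : List Char)) := by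
            apply Prod.ext <;> simp [h1, h3]
          rw [← ha2] at this
          rw [show b = (b.1, b.2) from rfl, this]
    rw [hshift]
    exact stepCore hL hline a

theorem foldRel {limit : Int} (hL : 1 ≤ limit) (lines : List (List Char))
    (hl : ∀ l ∈ lines, l ≠ []) :
    ∀ (a b : List (List Char) × List Char), pvRel limit a b →
    pvRel limit (lines.foldl (pvStepA limit) a)
      ((lines.flatMap (pvUnits limit)).foldl (pvPackStep limit) b) := by
  induction lines with
  | nil => intro a b hrel; simpa using hrel
  | cons l ls ih =>
      intro a b hrel
      have hlne : l ≠ [] := hl l (by simp)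
      rw [List.flatMap_cons, List.foldl_append, List.foldl_cons]
      exact ih (fun x hx => hl x (by simp [hx])) _ _ (stepRel hL hlne hrel)

theorem flush_rel {limit : Int} (hL : 1 ≤ limit) {a b : List (List Char) × List Char}
    (hrel : pvRel limit a b) : pvFlush a = pvFlush b := by
  rcases hrel with h | ⟨h1, h2, h3⟩
  · rw [h]
  · have hbne : b.2 ≠ [] := by intro hx; rw [hx] at h2; simp at h2; omega
    rw [pvFlush, pvFlush, if_neg (by simp [h1]), if_pos hbne, h3]

theorem split_into_cards_eq {limit : Int} (hL : 1 ≤ limit) (text : String) :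
    split_into_cards text limit = split_into_cards_alt text limit := by
  have hrel := foldRel hL (pvSplitlinesKeep [] text.toList)
    (pvSplitlinesKeep_ne_nil [] text.toList) ([], []) ([], []) (Or.inl rfl)
  have hfl := flush_rel hL hrel
  rw [split_into_cards, split_into_cards_alt, PySem.List.foldl_append_eq_flatMap,
      List.nil_append]
  unfold pvFlush at hfl
  rw [hfl]

-- ===== VERDICT (by name: the statement is the Claim_ definition above) =====
theorem split_into_cards_spec : Claim_equal_split_into_cards := by
  intro text limit _ hpre
  unfold Spec_split_into_cards
  rcases hpre with hL | htext
  · exact split_into_cards_eq hL text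
  · subst htext
    simp [split_into_cards, split_into_cards_alt, pvSplitlinesKeep]
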